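-- pv_equiv track=rewrite | github.com/luisdi187/legendary-succotash | Prueba corta 4. Luis Diego Rodriguez.py | trioListas
-- ===== SOURCE A (Python) =====
-- def trioListas(pLista1, pLista2):
--     nuevaLista = []
--     indice = 0
--     ciclo = 0
--     if pLista1 == []  or pLista2 == []:
--         return []
--     while pLista2 != []:
--         elemento = pLista2[0]
--         if indice != len(pLista1):
--             while indice < len(pLista1):
--                 subLista = pLista1[indice]
--                 numero = subLista[2]
--                 if elemento == subLista[0]:
--                     while(numero != 0):
--                         nuevaLista.append(subLista[1])
--                         numero -= 1
--                         ciclo += 1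
--                 indice += 1
--             if ciclo == 0 :
--                 nuevaLista.append(elemento)
--         pLista2 = pLista2[1:]
--         indice = 0
--         ciclo = 0
--     return nuevaLista
-- ===== SOURCE B (Python) =====
-- def trioListas(pLista1, pLista2):
--     if not pLista1 or not pLista2:
--         return []
--     needed = set(pLista2)
--     exp = {}
--     for k, v, n in pLista1:
--         if n > 0 and k in needed:
--             exp[k] = exp.get(k, []) + [v] * n
--     return [x for e in pLista2 for x in exp.get(e, [e])]
-- ===== Notes on version B (the rewrite author's own statement) =====
-- stated objective: faster
-- what changed: B first takes set(pLista2) of needed keys, then in one pass over pLista1 builds a dict mapping each needed key directly to its fully expanded value list ([v]*n concatenated in order, positive counts only), and emits the answer as a single flat comprehension over pLista2 with exp.get(e, [e]) as the no-expansion fallback; A's per-element rescan of pLista1, its one-by-one decrement-and-append repetition loop and its ciclo flag all disappear.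
import Mathlib
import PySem

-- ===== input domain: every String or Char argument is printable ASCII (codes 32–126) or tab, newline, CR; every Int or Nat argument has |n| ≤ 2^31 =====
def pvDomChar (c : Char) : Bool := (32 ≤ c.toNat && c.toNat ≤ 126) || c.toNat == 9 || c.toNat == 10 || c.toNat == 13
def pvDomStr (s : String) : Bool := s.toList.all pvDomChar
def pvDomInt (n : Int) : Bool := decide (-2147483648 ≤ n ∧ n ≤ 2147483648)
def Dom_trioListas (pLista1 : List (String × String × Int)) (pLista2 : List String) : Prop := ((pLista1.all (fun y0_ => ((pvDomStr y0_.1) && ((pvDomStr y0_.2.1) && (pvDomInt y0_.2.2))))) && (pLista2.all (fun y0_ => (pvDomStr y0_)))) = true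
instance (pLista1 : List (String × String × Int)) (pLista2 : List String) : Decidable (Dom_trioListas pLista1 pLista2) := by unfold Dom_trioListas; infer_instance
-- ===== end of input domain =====

-- ===== PORT A =====
-- B builds the fully expanded value list per key once and emits one flat pass; objective: faster.
-- Python's 'while numero != 0: append; numero -= 1' never returns for negative numero;
-- the port counts numero.toNat appends (identical wherever the Python returns a value).
def pyRepeatWhile (v : String) : Nat → List String → List String
  | 0, acc => acc
  | n + 1, acc => pyRepeatWhile v n (acc ++ [v])

-- inner 'while indice < len(pLista1)' scan: state (nuevaLista, ciclo)
def trioInnerA (elemento : String) : List (String × String × Int) → List String → Int → (List String × Int)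
  | [], acc, ciclo => (acc, ciclo)
  | subLista :: rest, acc, ciclo =>
    if elemento == subLista.1 then
      trioInnerA elemento rest (pyRepeatWhile subLista.2.1 subLista.2.2.toNat acc)
        (ciclo + (subLista.2.2.toNat : Int))
    else
      trioInnerA elemento rest acc ciclo

-- outer 'while pLista2 != []' loop: pLista2 = pLista2[1:] each turn
def trioLoopA (pLista1 : List (String × String × Int)) : List String → List String → List String
  | [], acc => acc
  | elemento :: rest, acc =>
    if (0 : Nat) != pLista1.length then
      let r := trioInnerA elemento pLista1 acc 0
      trioLoopA pLista1 rest (if r.2 == 0 then r.1 ++ [elemento] else r.1)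
    else
      trioLoopA pLista1 rest acc

def trioListas (pLista1 : List (String × String × Int)) (pLista2 : List String) : List String :=
  if pLista1 == [] || pLista2 == [] then [] else trioLoopA pLista1 pLista2 []

-- ===== PORT B =====
-- 'for k, v, n in pLista1: if n > 0 and k in needed: exp[k] = exp.get(k, []) + [v] * n'
def trioIndexB (pLista1 : List (String × String × Int)) (needed : PySem.Set String) : PySem.Dict String (List String) :=
  pLista1.foldl
    (fun d p =>
      if 0 < p.2.2 && needed.contains p.1 then
        d.insert p.1 (d.getD p.1 [] ++ List.replicate p.2.2.toNat p.2.1)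
      else d)
    PySem.Dict.empty

-- 'needed = set(pLista2)' then '[x for e in pLista2 for x in exp.get(e, [e])]'
def trioListas_alt (pLista1 : List (String × String × Int)) (pLista2 : List String) : List String :=
  if pLista1 == [] || pLista2 == [] then []
  else
    let needed := PySem.Set.ofList pLista2
    pLista2.flatMap (fun e => (trioIndexB pLista1 needed).getD e [e])

-- ===== PRECONDITION & SPEC =====
def Spec_trioListas (pLista1 : List (String × String × Int)) (pLista2 : List String) (out : List String) : Prop := out = trioListas_alt pLista1 pLista2
instance (pLista1 : List (String × String × Int)) (pLista2 : List String) (out : List String) : Decidable (Spec_trioListas pLista1 pLista2 out) := by unfold Spec_trioListas; infer_instance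

-- ===== CLAIM (what is proved, stated in full; the proofs are below) =====
def Claim_equal_trioListas : Prop := ∀ (pLista1 : List (String × String × Int)) (pLista2 : List String), Dom_trioListas pLista1 pLista2 → Spec_trioListas pLista1 pLista2 (trioListas pLista1 pLista2)

-- ===== LEMMAS AND PROOFS =====

-- expansion of one element: concatenated replicates over matching entries, in order
def trioExp (e : String) (l : List (String × String × Int)) : List String :=
  (l.filter (fun p => e == p.1)).flatMap (fun p => List.replicate p.2.2.toNat p.2.1)

theorem pyRepeatWhile_eq (v : String) : ∀ (n : Nat) (acc : List String),
    pyRepeatWhile v n acc = acc ++ List.replicate n v := by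
  intro n
  induction n with
  | zero => intro acc; simp [pyRepeatWhile]
  | succ m ih =>
    intro acc
    simp only [pyRepeatWhile]
    rw [ih]
    simp [List.replicate_succ]

theorem trioInnerA_eq (e : String) : ∀ (l : List (String × String × Int)) (acc : List String) (c : Int),
    trioInnerA e l acc c = (acc ++ trioExp e l, c + ((trioExp e l).length : Int)) := by
  intro l
  induction l with
  | nil => intro acc c; simp [trioInnerA, trioExp]
  | cons p rest ih =>
    intro acc c
    by_cases h : e = p.1
    · subst h
      simp only [trioInnerA, beq_self_eq_true, if_true, ih, pyRepeatWhile_eq]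
      simp only [trioExp, List.filter_cons, beq_self_eq_true, if_true, List.flatMap_cons,
        Prod.mk.injEq]
      refine ⟨by simp, ?_⟩
      simp [List.length_append]
      omega
    · simp [trioInnerA, trioExp, h, ih]

-- A's outer loop emits, per element, its expansion or the element itself when it is empty
theorem trioLoopA_flat (l1 : List (String × String × Int)) (h1 : l1 ≠ []) :
    ∀ (l2 acc : List String),
    trioLoopA l1 l2 acc
      = acc ++ l2.flatMap (fun e => if trioExp e l1 = [] then [e] else trioExp e l1) := by
  intro l2
  induction l2 with
  | nil => intro acc; simp [trioLoopA]
  | cons e rest ih =>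
    intro acc
    have hlen : (0 : Nat) ≠ l1.length := by
      cases l1 with
      | nil => exact absurd rfl h1
      | cons _ _ => simp
    simp only [trioLoopA, trioInnerA_eq, bne_iff_ne, ne_eq]
    rw [if_pos hlen]
    by_cases hF : trioExp e l1 = []
    · simp [hF, ih]
    · have hlen0 : (trioExp e l1).length ≠ 0 := by
        simpa [List.length_eq_zero_iff] using hF
      simp [hF, ih, hlen0]

-- B's fold (for a key e that is in the needed set): the stored list for key e is
-- exactly its expansion, and the key is present iff the expansion is nonempty
theorem trioIndexB_get? (e : String) (needed : PySem.Set String)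
    (he : needed.contains e = true) :
    ∀ (l : List (String × String × Int)) (d : PySem.Dict String (List String)),
    (l.foldl
      (fun d p =>
        if 0 < p.2.2 && needed.contains p.1 then
          d.insert p.1 (d.getD p.1 [] ++ List.replicate p.2.2.toNat p.2.1)
        else d) d).get? e
      = match d.get? e with
        | some xs => some (xs ++ trioExp e l)
        | none => if trioExp e l = [] then none else some (trioExp e l) := by
  intro l
  induction l with
  | nil =>
    intro d
    cases h : d.get? e <;> simp [trioExp, h]
  | cons p rest ih =>
    intro d
    have hExp : trioExp e (p :: rest)
        = (if e == p.1 then List.replicate p.2.2.toNat p.2.1 else []) ++ trioExp e rest := by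
      by_cases h : e = p.1 <;> simp [trioExp, h]
    by_cases h : e = p.1
    · have hc : p.1 ∈ needed := by
        have : needed.contains p.1 = true := by rw [← h]; exact he
        simpa using this
      by_cases hn : 0 < p.2.2
      · have hne : List.replicate p.2.2.toNat p.2.1 ≠ [] := by
          have : p.2.2.toNat ≠ 0 := by omega
          simp [List.replicate_eq_nil_iff, this]
        rw [List.foldl_cons, if_pos (by simp [hn, hc]), ih]
        have hins : ((d.insert p.1 (d.getD p.1 [] ++ List.replicate p.2.2.toNat p.2.1)).get? e)
            = some (d.getD p.1 [] ++ List.replicate p.2.2.toNat p.2.1) := by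
          rw [h, PySem.Dict.get?_insert_self]
        rw [hins]
        have hExp' : trioExp p.1 (p :: rest)
            = List.replicate p.2.2.toNat p.2.1 ++ trioExp p.1 rest := by
          simp [trioExp]
        cases hd : d.get? e with
        | some xs =>
          have hgd : d.getD p.1 [] = xs := by rw [← h]; simp [PySem.Dict.getD, hd]
          simp [h, hgd, hExp', List.append_assoc]
        | none =>
          have hgd : d.getD p.1 [] = [] := by rw [← h]; simp [PySem.Dict.getD, hd]
          simp [h, hgd, hExp', hne]
      · have h0 : p.2.2.toNat = 0 := by omega
        rw [List.foldl_cons, if_neg (by simp [hn]), ih]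
        simp [hExp, h0]
    · by_cases hc : (0 < p.2.2 && needed.contains p.1) = true
      · rw [List.foldl_cons, if_pos hc, ih, PySem.Dict.get?_insert_of_ne _ _ h]
        simp [hExp, h]
      · rw [List.foldl_cons, if_neg hc, ih]
        simp [hExp, h]

theorem trioIndexB_getD (e : String) (l : List (String × String × Int))
    (needed : PySem.Set String) (he : needed.contains e = true) :
    (trioIndexB l needed).getD e [e] = if trioExp e l = [] then [e] else trioExp e l := by
  have h : (trioIndexB l needed).get? e
      = if trioExp e l = [] then none else some (trioExp e l) := by
    have h0 := trioIndexB_get? e needed he l PySem.Dict.empty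
    rw [PySem.Dict.get?_empty] at h0
    exact h0
  have hgd : (trioIndexB l needed).getD e [e] = ((trioIndexB l needed).get? e).getD [e] := rfl
  rw [hgd, h]
  by_cases hF : trioExp e l = [] <;> simp [hF]

-- ===== VERDICT (by name: the statement is the Claim_ definition above) =====
theorem trioListas_spec : Claim_equal_trioListas := by
  intro l1 l2 _
  unfold Spec_trioListas trioListas trioListas_alt
  by_cases h1 : l1 = []
  · simp [h1]
  · by_cases h2 : l2 = []
    · simp [h2]
    · have hg : (l1 == [] || l2 == []) = false := by simp [h1, h2]
      rw [hg]
      simp only [Bool.false_eq_true, if_false]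
      rw [trioLoopA_flat l1 h1 l2 []]
      simp only [List.nil_append]
      refine List.flatMap_congr (fun e hmem => ?_)
      have he : (PySem.Set.ofList l2).contains e = true := by
        simpa [PySem.Set.mem_ofList] using hmem
      exact (trioIndexB_getD e l1 (PySem.Set.ofList l2) he).symm
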